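-- pv_equiv track=rewrite | github.com/Frankycoding/area01 | BabyNames.py | lesspop
-- ===== SOURCE A (Python) =====
-- def all(name,diction):
--     if name in diction:
--         if diction[name].count(1001)==0:
--             return True
--
-- def lesspop(name,diction):
--     Flag=False
--     if name in diction and all(name,diction):
--         for i in range(len(diction[name])-1):
--             if diction[name][i]<=diction[name][i+1]:
--                 Flag=True
--                 continue
--             else:
--                 Flag=False
--                 break
--     return Flag
-- ===== SOURCE B (Python) =====
-- def lesspop(name, diction):
--     lst = diction.get(name)
--     if lst is None or 1001 in lst:
--         return False
--     return lst == sorted(lst)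
-- ===== Notes on version B (the rewrite author's own statement) =====
-- stated objective: simpler
-- what changed: Replaced the helper-plus-index-loop pairwise scan (with break/continue and a Flag accumulator) by a three-line guard chain with a single dict .get and a sort-and-compare non-decreasing test.
-- intended difference: When name maps to a 1001-free list of length < 2, A returns False because its adjacent-pair loop never sets Flag, while B returns True, the intended value since an empty or singleton list is trivially non-decreasing. — e.g. on lesspop("a", [("a", [5])]): A returns false, B returns true
import Mathlib
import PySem

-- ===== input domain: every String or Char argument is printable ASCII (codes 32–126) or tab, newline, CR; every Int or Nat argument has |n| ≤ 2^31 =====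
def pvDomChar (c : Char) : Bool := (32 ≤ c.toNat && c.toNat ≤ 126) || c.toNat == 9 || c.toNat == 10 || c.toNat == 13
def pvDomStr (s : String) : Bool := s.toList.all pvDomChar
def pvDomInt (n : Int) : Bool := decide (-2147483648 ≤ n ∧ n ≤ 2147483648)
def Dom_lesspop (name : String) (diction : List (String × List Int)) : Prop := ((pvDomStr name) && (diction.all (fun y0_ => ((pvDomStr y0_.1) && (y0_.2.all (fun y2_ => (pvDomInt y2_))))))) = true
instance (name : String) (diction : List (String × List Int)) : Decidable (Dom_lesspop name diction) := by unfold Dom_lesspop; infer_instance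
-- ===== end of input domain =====

-- B replaces A's helper + index loop (Flag/break/continue) by a guard chain with one
-- dict lookup and a sort-and-compare non-decreasing test; on 1001-free lists of length < 2
-- it returns True (trivially non-decreasing) where A's loop leaves Flag=False — see D_lesspop.

-- ===== PORT A =====
-- Python helper `all(name, diction)`: truthy (True) iff name is present and its list counts no 1001
def lesspopAll (name : String) (diction : List (String × List Int)) : Bool :=
  match diction.lookup name with
  | some lst => lst.count 1001 == 0
  | none => false

-- the `for i in range(len(..)-1)` loop: flag accumulator, `continue` on ≤, `break` to false
def lesspopLoop (lst : List Int) (idxs : List Int) (flag : Bool) : Bool :=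
  match idxs with
  | [] => flag
  | i :: rest =>
    match PySem.List.pyGet? lst i, PySem.List.pyGet? lst (i + 1) with
    | some a, some b => if a ≤ b then lesspopLoop lst rest true else false
    | _, _ => false  -- unreachable: range(len-1) indices i, i+1 are always in range

def lesspop (name : String) (diction : List (String × List Int)) : Bool :=
  if (diction.lookup name).isSome && lesspopAll name diction then
    match diction.lookup name with
    | some lst => lesspopLoop lst (PySem.List.pyRange 0 ((lst.length : Int) - 1) 1) false
    | none => false  -- unreachable: guard ensures the key is present
  else false

-- ===== PORT B =====
def lesspop_alt (name : String) (diction : List (String × List Int)) : Bool :=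
  match diction.lookup name with
  | none => false
  | some lst =>
    if lst.contains 1001 then false
    else lst == PySem.List.sorted lst (fun x => x) false

-- ===== PRECONDITION & SPEC =====
-- When name maps to a 1001-free list of length < 2, A returns False (its adjacent-pair loop
-- never sets Flag) while B returns True, the intended value: such a list is trivially non-decreasing.
def D_lesspop (name : String) (diction : List (String × List Int)) : Prop :=
  ((diction.lookup name).any (fun lst => !lst.contains 1001 && lst.length < 2)) = true
instance (name : String) (diction : List (String × List Int)) : Decidable (D_lesspop name diction) := by unfold D_lesspop; infer_instance

def Spec_lesspop (name : String) (diction : List (String × List Int)) (out : Bool) : Prop := ¬ D_lesspop name diction → out = lesspop_alt name diction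
instance (name : String) (diction : List (String × List Int)) (out : Bool) : Decidable (Spec_lesspop name diction out) := by unfold Spec_lesspop; infer_instance

def pvDiffWitness_lesspop : String × (List (String × List Int)) := ("a", [("a", [5])])
def pvDiffWitnessOut_lesspop : Bool × Bool := (false, true)

-- ===== CLAIM (what is proved, stated in full; the proofs are below) =====
def Claim_unchanged_lesspop : Prop := ∀ (name : String) (diction : List (String × List Int)), Dom_lesspop name diction → Spec_lesspop name diction (lesspop name diction)
def Claim_changed_lesspop : Prop := Dom_lesspop (pvDiffWitness_lesspop.1) (pvDiffWitness_lesspop.2) ∧ D_lesspop (pvDiffWitness_lesspop.1) (pvDiffWitness_lesspop.2) ∧ lesspop (pvDiffWitness_lesspop.1) (pvDiffWitness_lesspop.2) = pvDiffWitnessOut_lesspop.1 ∧ lesspop_alt (pvDiffWitness_lesspop.1) (pvDiffWitness_lesspop.2) = pvDiffWitnessOut_lesspop.2 ∧ pvDiffWitnessOut_lesspop.1 ≠ pvDiffWitnessOut_lesspop.2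
def Claim_exact_lesspop : Prop := ∀ (name : String) (diction : List (String × List Int)), Dom_lesspop name diction → D_lesspop name diction → lesspop name diction ≠ lesspop_alt name diction

-- ===== LEMMAS AND PROOFS =====

-- when the remaining index range is empty (i ≥ len-1), the loop returns the flag and the drop is chain-trivial
theorem loop_empty (lst : List Int) (i : Nat) (h : lst.length ≤ i + 1) :
    lesspopLoop lst (PySem.List.pyRange (i : Int) ((lst.length : Int) - 1) 1) true
      = decide (List.IsChain (· ≤ ·) (lst.drop i)) := by
  have hr : PySem.List.pyRange (i : Int) ((lst.length : Int) - 1) 1 = [] := by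
    rw [PySem.List.pyRange_one]
    have h0 : ((lst.length : Int) - 1 - i).toNat = 0 := by omega
    simp [h0]
  rw [hr]
  have hlen : (lst.drop i).length ≤ 1 := by
    rw [List.length_drop]; omega
  cases hd : lst.drop i with
  | nil => simp [lesspopLoop]
  | cons x t =>
    cases t with
    | nil => simp [lesspopLoop]
    | cons y u => rw [hd] at hlen; simp at hlen

-- loop invariant: from index i on (flag already true), A's loop decides adjacent-nondecreasingness of drop i
theorem loopG (lst : List Int) : ∀ (n i : Nat), lst.length - 1 - i ≤ n →
    lesspopLoop lst (PySem.List.pyRange (i : Int) ((lst.length : Int) - 1) 1) true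
      = decide (List.IsChain (· ≤ ·) (lst.drop i)) := by
  intro n
  induction n with
  | zero =>
    intro i h1
    exact loop_empty lst i (by omega)
  | succ n ih =>
    intro i h1
    by_cases hc : (i : Int) < (lst.length : Int) - 1
    · have hi1 : i + 1 < lst.length := by omega
      have hi0 : i < lst.length := by omega
      rw [PySem.List.pyRange_one_cons hc]
      have hcast : ((i : Int) + 1) = ((i + 1 : Nat) : Int) := by push_cast; ring
      have hga : PySem.List.pyGet? lst (i : Int) = some lst[i] := by
        rw [PySem.List.pyGet?_natCast, List.getElem?_eq_getElem hi0]
      have hgb : PySem.List.pyGet? lst ((i : Int) + 1) = some lst[i+1] := by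
        rw [hcast, PySem.List.pyGet?_natCast, List.getElem?_eq_getElem hi1]
      simp only [lesspopLoop, hga, hgb]
      by_cases hab : lst[i] ≤ lst[i+1]
      · rw [if_pos hab, hcast, ih (i+1) (by omega)]
        rw [decide_eq_decide, List.drop_eq_getElem_cons hi0, List.drop_eq_getElem_cons hi1,
          List.isChain_cons_cons]
        exact (and_iff_right hab).symm
      · have hnc : ¬ List.IsChain (fun x1 x2 : Int => x1 ≤ x2)
            (lst[i] :: lst[i+1] :: List.drop (i+1+1) lst) := by
          rw [List.isChain_cons_cons]; exact fun h => hab h.1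
        rw [if_neg hab, List.drop_eq_getElem_cons hi0, List.drop_eq_getElem_cons hi1]
        exact (decide_eq_false hnc).symm
    · exact loop_empty lst i (by omega)

-- on a list of length ≥ 2 A's loop (started with Flag=False) decides adjacent-nondecreasingness
theorem loop_main (lst : List Int) (h : 2 ≤ lst.length) :
    lesspopLoop lst (PySem.List.pyRange 0 ((lst.length : Int) - 1) 1) false
      = decide (List.IsChain (· ≤ ·) lst) := by
  have hc : (0 : Int) < (lst.length : Int) - 1 := by omega
  have hflag : lesspopLoop lst (PySem.List.pyRange 0 ((lst.length : Int) - 1) 1) false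
      = lesspopLoop lst (PySem.List.pyRange 0 ((lst.length : Int) - 1) 1) true := by
    rw [PySem.List.pyRange_one_cons hc]; rfl
  rw [hflag]
  have := loopG lst lst.length 0 (by omega)
  simpa using this

-- B's sort-and-compare decides Pairwise (≤)
theorem alt_sorted_eq_pairwise (lst : List Int) :
    (lst == PySem.List.sorted lst (fun x => x) false) = decide (List.Pairwise (· ≤ ·) lst) := by
  by_cases hp : List.Pairwise (fun a b : Int => a ≤ b) lst
  · rw [PySem.List.sorted_eq_self_of_pairwise lst (fun x => x) hp]
    simp [hp]
  · have hne : lst ≠ PySem.List.sorted lst (fun x => x) false := by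
      intro heq
      exact hp (heq ▸ PySem.List.sorted_pairwise lst (fun x => x))
    simp [hp, hne]

theorem lesspop_spec : Claim_unchanged_lesspop := by
  intro name diction _ hnd
  show lesspop name diction = lesspop_alt name diction
  cases hl : diction.lookup name with
  | none => simp [lesspop, lesspop_alt, lesspopAll, hl]
  | some lst =>
    by_cases hmem : (1001 : Int) ∈ lst
    · have hcnt : (lst.count 1001 == 0) = false := by
        simp [List.count_eq_zero, hmem]
      simp [lesspop, lesspop_alt, lesspopAll, hl, hcnt, hmem]
    · have hcnt : (lst.count 1001 == 0) = true := by
        simp [List.count_eq_zero, hmem]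
      have hlen : 2 ≤ lst.length := by
        unfold D_lesspop at hnd
        rw [hl] at hnd
        simp [hmem] at hnd
        omega
      have hcont : lst.contains 1001 = false := by
        simp [hmem]
      simp only [lesspop, lesspop_alt, lesspopAll, hl, hcnt, hcont, Option.isSome_some,
        Bool.and_true, if_true, Bool.false_eq_true, if_false]
      rw [loop_main lst hlen, alt_sorted_eq_pairwise, decide_eq_decide]
      exact List.isChain_iff_pairwise

theorem lesspop_changed : Claim_changed_lesspop := by
  unfold Claim_changed_lesspop; decide

theorem lesspop_tight : Claim_exact_lesspop := by
  intro name diction _ hd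
  unfold D_lesspop at hd
  cases hl : diction.lookup name with
  | none => rw [hl] at hd; simp at hd
  | some lst =>
    rw [hl] at hd
    simp at hd
    obtain ⟨hmem, hlen⟩ := hd
    have hcnt : (lst.count 1001 == 0) = true := by
      simp [List.count_eq_zero, hmem]
    have hr : PySem.List.pyRange 0 ((lst.length : Int) - 1) 1 = [] := by
      rw [PySem.List.pyRange_one]
      simp
      omega
    have hpair : List.Pairwise (fun a b : Int => a ≤ b) lst := by
      cases lst with
      | nil => simp
      | cons x t =>
        cases t with
        | nil => simp
        | cons y u => simp at hlen
    have hA : lesspop name diction = false := by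
      simp [lesspop, lesspopAll, hl, hcnt, hr, lesspopLoop]
    have hB : lesspop_alt name diction = true := by
      simp only [lesspop_alt, hl]
      rw [if_neg (by simp [hmem])]
      rw [PySem.List.sorted_eq_self_of_pairwise lst (fun x => x) hpair]
      simp
    rw [hA, hB]
    simp
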